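-- pv_equiv track=rewrite | github.com/ChanLim-BD/DS-Algorithm | 과거 기록들/Programmers/LV.0/컨트롤 Z.py | solution
-- ===== SOURCE A (Python) =====
-- def solution(s):
--     numz = s.split()
--     answer = []
--     x = 0
--     for n in numz:
--         if n == "Z":
--             answer.pop()
--         else:
--             answer.append(int(n))
--     for i in answer:
--         x += i
--     return x
-- ===== SOURCE B (Python) =====
-- def solution(s):
--     total = 0
--     skip = 0
--     for n in reversed(s.split()):
--         if n == "Z":
--             skip += 1
--         elif skip:
--             skip -= 1
--         else:
--             total += int(n)
--     return total
-- ===== Notes on version B (the rewrite author's own statement) =====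
-- stated objective: alternative
-- what changed: Replaces the undo stack entirely: B scans the tokens right-to-left with a pending-skip counter (each Z skips the nearest surviving earlier number), summing only surviving numbers in one pass with no stack or list.
-- outside the precondition, e.g. on solution('Z'): A raises IndexError, B returns 0
import Mathlib
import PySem

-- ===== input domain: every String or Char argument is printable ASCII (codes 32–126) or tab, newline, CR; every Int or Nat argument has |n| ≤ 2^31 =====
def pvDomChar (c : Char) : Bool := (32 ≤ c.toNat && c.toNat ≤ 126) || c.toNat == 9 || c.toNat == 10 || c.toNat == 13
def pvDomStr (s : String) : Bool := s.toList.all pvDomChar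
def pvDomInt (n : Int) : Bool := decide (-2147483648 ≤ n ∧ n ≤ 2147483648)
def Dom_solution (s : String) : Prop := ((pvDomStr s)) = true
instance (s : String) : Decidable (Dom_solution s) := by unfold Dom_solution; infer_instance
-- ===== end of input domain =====

-- B replaces the undo stack by a right-to-left scan with a pending-skip counter
-- (no stack, O(1) extra state): an alternative algorithm, not claimed faster.


-- ===== PORT A =====
-- two passes: build the list `answer` (pop on "Z" = dropLast; Pre_ excludes the empty pop
-- and unparsable tokens, where Python raises), then sum it in a second loop
def solution (s : String) : Int :=
  let numz := PySem.Str.split₀ s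
  let answer := numz.foldl (fun (answer : List Int) n =>
    if n = "Z" then answer.dropLast
    else answer ++ [(PySem.Int.ofStr? n).getD 0]) []
  answer.foldl (fun x i => x + i) 0

-- ===== PORT B =====
-- one right-to-left pass carrying (total, pending-skip counter); no stack
def solution_alt (s : String) : Int :=
  ((PySem.Str.split₀ s).reverse.foldl (fun (st : Int × Nat) n =>
    if n = "Z" then (st.1, st.2 + 1)
    else if st.2 > 0 then (st.1, st.2 - 1)
    else (st.1 + (PySem.Int.ofStr? n).getD 0, st.2)) (0, 0)).1

-- ===== PRECONDITION & SPEC =====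
-- Pre_ excludes exactly the inputs where Python A raises: a non-"Z" token that int() rejects
-- (ValueError) or a "Z" arriving on an empty stack (IndexError, i.e. some prefix has more
-- "Z" tokens than numbers).
def Pre_solution (s : String) : Prop :=
  (∀ n ∈ PySem.Str.split₀ s, n ≠ "Z" → (PySem.Int.ofStr? n).isSome = true) ∧
  (∀ k ∈ List.range ((PySem.Str.split₀ s).length + 1),
    2 * ((PySem.Str.split₀ s).take k).count "Z" ≤ k)
instance (s : String) : Decidable (Pre_solution s) := by unfold Pre_solution; infer_instance
def pvWitness_solution : String := "1 2 Z 3"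
def Spec_solution (s : String) (out : Int) : Prop := out = solution_alt s
instance (s : String) (out : Int) : Decidable (Spec_solution s out) := by unfold Spec_solution; infer_instance

-- ===== CLAIM (what is proved, stated in full; the proofs are below) =====
def Claim_equal_solution : Prop := ∀ (s : String), Dom_solution s → Pre_solution s → Spec_solution s (solution s)

-- ===== LEMMAS AND PROOFS =====

-- A's stack after processing a token list
def pvStackA (ts : List String) : List Int :=
  ts.foldl (fun (answer : List Int) n =>
    if n = "Z" then answer.dropLast
    else answer ++ [(PySem.Int.ofStr? n).getD 0]) []

theorem pv_iter_dropLast_nil (k : Nat) : List.dropLast^[k] ([] : List Int) = [] := by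
  induction k with
  | zero => rfl
  | succ n ih => rw [Function.iterate_succ_apply, List.dropLast_nil, ih]

theorem pv_inv (rts : List String) (tot : Int) (k : Nat) :
    (rts.foldl (fun (st : Int × Nat) n =>
      if n = "Z" then (st.1, st.2 + 1)
      else if st.2 > 0 then (st.1, st.2 - 1)
      else (st.1 + (PySem.Int.ofStr? n).getD 0, st.2)) (tot, k)).1
    = tot + (List.dropLast^[k] (pvStackA rts.reverse)).foldl (fun x i => x + i) 0 := by
  induction rts generalizing tot k with
  | nil => simp [pvStackA, pv_iter_dropLast_nil]
  | cons t rs ih =>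
    by_cases hZ : t = "Z"
    · have hs : pvStackA ((t :: rs).reverse) = (pvStackA rs.reverse).dropLast := by
        simp only [List.reverse_cons]; simp [pvStackA, List.foldl_append, hZ]
      simp only [List.foldl_cons]
      rw [if_pos hZ, ih, hs, ← Function.iterate_succ_apply]
    · have hs : pvStackA ((t :: rs).reverse)
          = pvStackA rs.reverse ++ [(PySem.Int.ofStr? t).getD 0] := by
        simp only [List.reverse_cons]; simp [pvStackA, List.foldl_append, hZ]
      simp only [List.foldl_cons]
      rw [if_neg hZ]
      by_cases hk : k > 0
      · rw [if_pos hk, ih, hs]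
        have hkk : k = (k - 1) + 1 := by omega
        rw [hkk, Function.iterate_succ_apply]
        simp
      · have hk0 : k = 0 := by omega
        rw [if_neg hk, ih, hs, hk0]
        simp [List.foldl_append]
        ring

-- ===== VERDICT (by name: the statement is the Claim_ definition above) =====
theorem solution_spec : Claim_equal_solution := by
  intro s _ _
  unfold Spec_solution solution solution_alt
  have h := pv_inv (PySem.Str.split₀ s).reverse 0 0
  simp only [List.reverse_reverse, Function.iterate_zero, id] at h
  rw [h]
  simp [pvStackA]
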